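-- pv_equiv track=rewrite | github.com/LukaDD7/ChangHai-Pancreas | skills/pancreatic_vessel_segmentor/scripts/run_canonical_vessel_library.py | canonical_key_from_name
-- ===== SOURCE A (Python) =====
-- VESSEL_ALIASES = {
--     "superior_mesenteric_artery": {"sma", "superior_mesenteric_artery", "superior_mesenteric_artery_mask"},
--     "superior_mesenteric_vein": {"smv", "superior_mesenteric_vein", "superior_mesenteric_vein_mask"},
--     "celiac_trunk": {"ca", "celiac_trunk", "celiac_axis"},
--     "common_hepatic_artery": {"cha", "common_hepatic_artery"},
--     "splenic_artery": {"splenic_artery", "spla"},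
--     "gastroduodenal_artery": {"gda", "gastroduodenal_artery"},
--     "portal_vein_and_splenic_vein": {"pv", "mpv", "portal_vein_and_splenic_vein"},
--     "splenic_vein": {"sv", "splenic_vein"},
--     "inferior_vena_cava": {"ivc", "inferior_vena_cava"},
--     "aorta": {"ao", "aorta"},
-- }
--
-- def normalize_stem(name: str) -> str:
--     return name.lower().replace(" ", "_").replace("-", "_")
--
-- def canonical_key_from_name(name: str) -> str | None:
--     stem = normalize_stem(name)
--     if stem.endswith(".nii.gz"):
--         stem = stem[:-7]
--     elif stem.endswith(".nii"):
--         stem = stem[:-4]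
--
--     for canonical, aliases in VESSEL_ALIASES.items():
--         if stem == canonical or stem in aliases:
--             return canonical
--     return None
-- ===== SOURCE B (Python) =====
-- VESSEL_ALIASES = {
--     "superior_mesenteric_artery": {"sma", "superior_mesenteric_artery", "superior_mesenteric_artery_mask"},
--     "superior_mesenteric_vein": {"smv", "superior_mesenteric_vein", "superior_mesenteric_vein_mask"},
--     "celiac_trunk": {"ca", "celiac_trunk", "celiac_axis"},
--     "common_hepatic_artery": {"cha", "common_hepatic_artery"},
--     "splenic_artery": {"splenic_artery", "spla"},
--     "gastroduodenal_artery": {"gda", "gastroduodenal_artery"},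
--     "portal_vein_and_splenic_vein": {"pv", "mpv", "portal_vein_and_splenic_vein"},
--     "splenic_vein": {"sv", "splenic_vein"},
--     "inferior_vena_cava": {"ivc", "inferior_vena_cava"},
--     "aorta": {"ao", "aorta"},
-- }
--
-- # Flat reverse index built once at import time: every alias (and each
-- # canonical key itself) maps to its canonical key.  No alias belongs to two
-- # groups, so the dict is well defined and a single hash lookup replaces the
-- # per-group scan.
-- _REVERSE = {}
-- for _canonical, _aliases in VESSEL_ALIASES.items():
--     _REVERSE[_canonical] = _canonical
--     for _alias in _aliases:
--         _REVERSE[_alias] = _canonical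
--
-- def canonical_key_from_name(name: str) -> str | None:
--     stem = name.lower().replace(" ", "_").replace("-", "_")
--     if stem.endswith(".nii.gz"):
--         stem = stem[:-7]
--     elif stem.endswith(".nii"):
--         stem = stem[:-4]
--     return _REVERSE.get(stem)
-- ===== Notes on version B (the rewrite author's own statement) =====
-- stated objective: idiomatic
-- what changed: Replaces the per-call scan over the ten alias groups with a flat reverse dictionary (alias -> canonical) built once at module import, so the function body is normalize + suffix-strip + one dict lookup.
import Mathlib
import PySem

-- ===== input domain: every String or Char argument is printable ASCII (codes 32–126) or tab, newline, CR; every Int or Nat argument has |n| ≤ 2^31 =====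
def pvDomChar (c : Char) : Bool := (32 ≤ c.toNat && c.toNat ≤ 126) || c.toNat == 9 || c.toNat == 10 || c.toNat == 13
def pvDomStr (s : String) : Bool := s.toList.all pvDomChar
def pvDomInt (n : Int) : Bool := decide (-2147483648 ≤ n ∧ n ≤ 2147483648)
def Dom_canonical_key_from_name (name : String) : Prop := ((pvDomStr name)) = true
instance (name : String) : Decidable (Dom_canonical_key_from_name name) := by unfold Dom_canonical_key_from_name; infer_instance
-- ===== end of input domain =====

-- B replaces A's per-call scan over the ten alias groups by a flat reverse map
-- (alias -> canonical) built once, so the lookup is a single association-list probe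
-- (a dict in Python); objective: more idiomatic.

-- ===== PORT A =====
-- module constant: dict canonical -> set of aliases (sets as lists of distinct elements)
def VESSEL_ALIASES : List (String × List String) :=
  [ ("superior_mesenteric_artery", ["sma", "superior_mesenteric_artery", "superior_mesenteric_artery_mask"]),
    ("superior_mesenteric_vein", ["smv", "superior_mesenteric_vein", "superior_mesenteric_vein_mask"]),
    ("celiac_trunk", ["ca", "celiac_trunk", "celiac_axis"]),
    ("common_hepatic_artery", ["cha", "common_hepatic_artery"]),
    ("splenic_artery", ["splenic_artery", "spla"]),
    ("gastroduodenal_artery", ["gda", "gastroduodenal_artery"]),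
    ("portal_vein_and_splenic_vein", ["pv", "mpv", "portal_vein_and_splenic_vein"]),
    ("splenic_vein", ["sv", "splenic_vein"]),
    ("inferior_vena_cava", ["ivc", "inferior_vena_cava"]),
    ("aorta", ["ao", "aorta"]) ]

-- helper of A: name.lower().replace(" ", "_").replace("-", "_")
def normalize_stem (name : String) : String :=
  PySem.Str.replace (PySem.Str.replace (PySem.Str.lower name) " " "_") "-" "_"

-- A's for-loop over VESSEL_ALIASES.items() with early return
def scanAliases (stem : String) : List (String × List String) → Option String
  | [] => none
  | (canonical, aliases) :: rest =>
      if stem == canonical || aliases.contains stem then some canonical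
      else scanAliases stem rest

def canonical_key_from_name (name : String) : Option String :=
  let stem := normalize_stem name
  let stem :=
    if PySem.Str.endswith stem ".nii.gz" then PySem.Str.slice stem none (some (-7))
    else if PySem.Str.endswith stem ".nii" then PySem.Str.slice stem none (some (-4))
    else stem
  scanAliases stem VESSEL_ALIASES

-- ===== PORT B =====
-- the module-level loop of Source B: REVERSE[canonical] = canonical; for alias: REVERSE[alias] = canonical
def reverseMap : PySem.Dict String String :=
  VESSEL_ALIASES.foldl
    (fun d p => p.2.foldl (fun d a => d.insert a p.1) (d.insert p.1 p.1))
    PySem.Dict.empty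

def canonical_key_from_name_alt (name : String) : Option String :=
  let stem := PySem.Str.replace (PySem.Str.replace (PySem.Str.lower name) " " "_") "-" "_"
  let stem :=
    if PySem.Str.endswith stem ".nii.gz" then PySem.Str.slice stem none (some (-7))
    else if PySem.Str.endswith stem ".nii" then PySem.Str.slice stem none (some (-4))
    else stem
  reverseMap.get? stem

-- ===== PRECONDITION & SPEC =====
def Spec_canonical_key_from_name (name : String) (out : Option String) : Prop := out = canonical_key_from_name_alt name
instance (name : String) (out : Option String) : Decidable (Spec_canonical_key_from_name name out) := by unfold Spec_canonical_key_from_name; infer_instance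

-- ===== CLAIM (what is proved, stated in full; the proofs are below) =====
def Claim_equal_canonical_key_from_name : Prop := ∀ (name : String), Dom_canonical_key_from_name name → Spec_canonical_key_from_name name (canonical_key_from_name name)

-- ===== LEMMAS AND PROOFS =====

-- the concrete value of the reverse map (25 entries; canonical first in each group,
-- duplicates of the canonical inside its own alias set overwritten in place)
set_option maxRecDepth 4000 in
theorem reverseMap_eq : reverseMap = PySem.Dict.mk
  [ ("superior_mesenteric_artery", "superior_mesenteric_artery"),
    ("sma", "superior_mesenteric_artery"),
    ("superior_mesenteric_artery_mask", "superior_mesenteric_artery"),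
    ("superior_mesenteric_vein", "superior_mesenteric_vein"),
    ("smv", "superior_mesenteric_vein"),
    ("superior_mesenteric_vein_mask", "superior_mesenteric_vein"),
    ("celiac_trunk", "celiac_trunk"),
    ("ca", "celiac_trunk"),
    ("celiac_axis", "celiac_trunk"),
    ("common_hepatic_artery", "common_hepatic_artery"),
    ("cha", "common_hepatic_artery"),
    ("splenic_artery", "splenic_artery"),
    ("spla", "splenic_artery"),
    ("gastroduodenal_artery", "gastroduodenal_artery"),
    ("gda", "gastroduodenal_artery"),
    ("portal_vein_and_splenic_vein", "portal_vein_and_splenic_vein"),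
    ("pv", "portal_vein_and_splenic_vein"),
    ("mpv", "portal_vein_and_splenic_vein"),
    ("splenic_vein", "splenic_vein"),
    ("sv", "splenic_vein"),
    ("inferior_vena_cava", "inferior_vena_cava"),
    ("ivc", "inferior_vena_cava"),
    ("aorta", "aorta"),
    ("ao", "aorta") ] := by rfl

-- the heart of the equivalence: for EVERY stem, the flat reverse map agrees with A's scan
set_option maxHeartbeats 4000000 in
theorem get?_reverseMap_eq_scan (stem : String) :
    reverseMap.get? stem = scanAliases stem VESSEL_ALIASES := by
  rw [reverseMap_eq]
  by_cases h0 : stem = "superior_mesenteric_artery"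
  · subst h0; rfl
  by_cases h1 : stem = "sma"
  · subst h1; rfl
  by_cases h2 : stem = "superior_mesenteric_artery_mask"
  · subst h2; rfl
  by_cases h3 : stem = "superior_mesenteric_vein"
  · subst h3; rfl
  by_cases h4 : stem = "smv"
  · subst h4; rfl
  by_cases h5 : stem = "superior_mesenteric_vein_mask"
  · subst h5; rfl
  by_cases h6 : stem = "celiac_trunk"
  · subst h6; rfl
  by_cases h7 : stem = "ca"
  · subst h7; rfl
  by_cases h8 : stem = "celiac_axis"
  · subst h8; rfl
  by_cases h9 : stem = "common_hepatic_artery"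
  · subst h9; rfl
  by_cases h10 : stem = "cha"
  · subst h10; rfl
  by_cases h11 : stem = "splenic_artery"
  · subst h11; rfl
  by_cases h12 : stem = "spla"
  · subst h12; rfl
  by_cases h13 : stem = "gastroduodenal_artery"
  · subst h13; rfl
  by_cases h14 : stem = "gda"
  · subst h14; rfl
  by_cases h15 : stem = "portal_vein_and_splenic_vein"
  · subst h15; rfl
  by_cases h16 : stem = "pv"
  · subst h16; rfl
  by_cases h17 : stem = "mpv"
  · subst h17; rfl
  by_cases h18 : stem = "splenic_vein"
  · subst h18; rfl
  by_cases h19 : stem = "sv"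
  · subst h19; rfl
  by_cases h20 : stem = "inferior_vena_cava"
  · subst h20; rfl
  by_cases h21 : stem = "ivc"
  · subst h21; rfl
  by_cases h22 : stem = "aorta"
  · subst h22; rfl
  by_cases h23 : stem = "ao"
  · subst h23; rfl
  have g0 : ¬ ("superior_mesenteric_artery" : String) = stem := fun e => h0 e.symm
  have g1 : ¬ ("sma" : String) = stem := fun e => h1 e.symm
  have g2 : ¬ ("superior_mesenteric_artery_mask" : String) = stem := fun e => h2 e.symm
  have g3 : ¬ ("superior_mesenteric_vein" : String) = stem := fun e => h3 e.symm
  have g4 : ¬ ("smv" : String) = stem := fun e => h4 e.symm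
  have g5 : ¬ ("superior_mesenteric_vein_mask" : String) = stem := fun e => h5 e.symm
  have g6 : ¬ ("celiac_trunk" : String) = stem := fun e => h6 e.symm
  have g7 : ¬ ("ca" : String) = stem := fun e => h7 e.symm
  have g8 : ¬ ("celiac_axis" : String) = stem := fun e => h8 e.symm
  have g9 : ¬ ("common_hepatic_artery" : String) = stem := fun e => h9 e.symm
  have g10 : ¬ ("cha" : String) = stem := fun e => h10 e.symm
  have g11 : ¬ ("splenic_artery" : String) = stem := fun e => h11 e.symm
  have g12 : ¬ ("spla" : String) = stem := fun e => h12 e.symm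
  have g13 : ¬ ("gastroduodenal_artery" : String) = stem := fun e => h13 e.symm
  have g14 : ¬ ("gda" : String) = stem := fun e => h14 e.symm
  have g15 : ¬ ("portal_vein_and_splenic_vein" : String) = stem := fun e => h15 e.symm
  have g16 : ¬ ("pv" : String) = stem := fun e => h16 e.symm
  have g17 : ¬ ("mpv" : String) = stem := fun e => h17 e.symm
  have g18 : ¬ ("splenic_vein" : String) = stem := fun e => h18 e.symm
  have g19 : ¬ ("sv" : String) = stem := fun e => h19 e.symm
  have g20 : ¬ ("inferior_vena_cava" : String) = stem := fun e => h20 e.symm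
  have g21 : ¬ ("ivc" : String) = stem := fun e => h21 e.symm
  have g22 : ¬ ("aorta" : String) = stem := fun e => h22 e.symm
  have g23 : ¬ ("ao" : String) = stem := fun e => h23 e.symm
  simp [scanAliases, VESSEL_ALIASES, PySem.Dict.get?, h0, h1, h2, h3, h4, h5, h6, h7, h8, h9, h10, h11, h12, h13, h14, h15, h16, h17, h18, h19, h20, h21, h22, h23, g0, g1, g2, g3, g4, g5, g6, g7, g8, g9, g10, g11, g12, g13, g14, g15, g16, g17, g18, g19, g20, g21, g22, g23]

-- ===== VERDICT (by name: the statement is the Claim_ definition above) =====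
theorem canonical_key_from_name_spec : Claim_equal_canonical_key_from_name := by
  intro name _
  unfold Spec_canonical_key_from_name canonical_key_from_name canonical_key_from_name_alt normalize_stem
  exact (get?_reverseMap_eq_scan _).symm
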